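-- pv_equiv track=rewrite | github.com/MK-Lee13/Algorithm-Study | Programmers/level_2/56_hopscotch.py | solution
-- ===== SOURCE A (Python) =====
-- def solution(land):
--     answer = 0
--     last_index = len(land) - 1
--     for i in range(1, len(land)):
--         land[i][0] += get_max(land[i - 1][1], land[i - 1][2], land[i - 1][3])
--         land[i][1] += get_max(land[i - 1][0], land[i - 1][2], land[i - 1][3])
--         land[i][2] += get_max(land[i - 1][0], land[i - 1][1], land[i - 1][3])
--         land[i][3] += get_max(land[i - 1][0], land[i - 1][1], land[i - 1][2])
--     return get_answer(land[last_index])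
--
-- def get_answer(last_arr):
--     max_num = 0
--     for arr in last_arr:
--         max_num = max(max_num, arr)
--     return max_num
--
-- def get_max(a, b, c):
--     max_num = a
--     max_num = max(max_num, b)
--     max_num = max(max_num, c)
--     return max_num
-- ===== SOURCE B (Python) =====
-- # Prefix/suffix-maxima decomposition: the value added to column j is the max of
-- # the other columns of the previous accumulated row, read off from precomputed
-- # prefix and suffix maxima instead of four explicit 3-way max scans.
-- # Like A, mutates `land` in place.
-- def solution(land):
--     for i in range(1, len(land)):
--         prev = land[i - 1]
--         pre = [prev[0]]
--         for j in range(1, 4):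
--             pre.append(max(pre[-1], prev[j]))
--         suf = [prev[3]]
--         for j in range(2, -1, -1):
--             suf.append(max(suf[-1], prev[j]))
--         suf.reverse()
--         row = land[i]
--         row[0] += suf[1]
--         row[1] += max(pre[0], suf[2])
--         row[2] += max(pre[1], suf[3])
--         row[3] += pre[2]
--     best = 0
--     for v in land[-1]:
--         best = max(best, v)
--     return best
-- ===== Notes on version B (the rewrite author's own statement) =====
-- stated objective: alternative
-- what changed: Replaces the four explicit 3-way max scans per row by prefix/suffix maxima of the previous accumulated row, reading each column's 'max of the other columns' in O(1); B performs the same in-place mutation of land as A.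
import Mathlib
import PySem

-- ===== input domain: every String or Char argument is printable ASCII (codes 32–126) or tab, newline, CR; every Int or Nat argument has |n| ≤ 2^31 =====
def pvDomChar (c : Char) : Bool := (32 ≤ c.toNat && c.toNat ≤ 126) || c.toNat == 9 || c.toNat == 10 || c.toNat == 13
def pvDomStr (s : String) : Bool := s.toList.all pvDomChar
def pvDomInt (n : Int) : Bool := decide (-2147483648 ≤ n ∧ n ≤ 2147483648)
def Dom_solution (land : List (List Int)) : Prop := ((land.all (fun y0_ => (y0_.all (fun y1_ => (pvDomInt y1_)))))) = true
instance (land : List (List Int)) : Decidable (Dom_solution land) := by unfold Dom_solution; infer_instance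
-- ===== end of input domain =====

-- B replaces A's four 3-way max scans per row by prefix/suffix maxima of the previous
-- accumulated row. Both Pythons mutate `land` in place identically; only the return
-- value is compared here.

-- ===== PORT A =====
def get_max (a b c : Int) : Int := max (max a b) c

def get_answer (last_arr : List Int) : Int := last_arr.foldl (fun m x => max m x) 0

-- one iteration of A's loop: update row i from the (already updated) row i-1.
-- Row reads land[i-1][k] / land[i][k] for k<4; `getD 0` is exact under Pre_ (rows have ≥ 4 cols when the loop runs).
def solStepA (prev row : List Int) : List Int :=
  let p0 := prev.getD 0 0
  let p1 := prev.getD 1 0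
  let p2 := prev.getD 2 0
  let p3 := prev.getD 3 0
  (row.getD 0 0 + get_max p1 p2 p3) ::
  (row.getD 1 0 + get_max p0 p2 p3) ::
  (row.getD 2 0 + get_max p0 p1 p3) ::
  (row.getD 3 0 + get_max p0 p1 p2) :: row.drop 4

def solRowsA (prev : List Int) : List (List Int) → List Int
  | [] => prev
  | row :: rest => solRowsA (solStepA prev row) rest

def solution (land : List (List Int)) : Int :=
  match land with
  | [] => 0          -- unreachable: Python raises IndexError on []; excluded by Pre_
  | r :: rest => get_answer (solRowsA r rest)

-- ===== PORT B =====
-- one iteration of B's loop: prefix maxima pre[0..2] and suffix maxima suf[1..3]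
def solStepB (prev row : List Int) : List Int :=
  let a := prev.getD 0 0
  let b := prev.getD 1 0
  let c := prev.getD 2 0
  let d := prev.getD 3 0
  let pre1 := max a b
  let pre2 := max pre1 c
  let suf2 := max d c
  let suf1 := max suf2 b
  (row.getD 0 0 + suf1) ::
  (row.getD 1 0 + max a suf2) ::
  (row.getD 2 0 + max pre1 d) ::
  (row.getD 3 0 + pre2) :: row.drop 4

def solRowsB (prev : List Int) : List (List Int) → List Int
  | [] => prev
  | row :: rest => solRowsB (solStepB prev row) rest

def solution_alt (land : List (List Int)) : Int :=
  match land with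
  | [] => 0
  | r :: rest => (solRowsB r rest).foldl (fun m x => max m x) 0

-- ===== PRECONDITION & SPEC =====
-- Pre_ excludes exactly the inputs where the Python A raises IndexError: the empty
-- list, and (when the loop runs, i.e. ≥ 2 rows) any row with fewer than 4 columns.
def Pre_solution (land : List (List Int)) : Prop :=
  land ≠ [] ∧ (1 < land.length → ∀ row ∈ land, 4 ≤ row.length)
instance (land : List (List Int)) : Decidable (Pre_solution land) := by unfold Pre_solution; infer_instance

def pvWitness_solution : List (List Int) :=
  [[1, 2, 3, 5], [5, 6, 7, 8], [4, 3, 2, 1]]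

def Spec_solution (land : List (List Int)) (out : Int) : Prop := out = solution_alt land
instance (land : List (List Int)) (out : Int) : Decidable (Spec_solution land out) := by unfold Spec_solution; infer_instance

-- ===== CLAIM (what is proved, stated in full; the proofs are below) =====
def Claim_equal_solution : Prop := ∀ (land : List (List Int)), Dom_solution land → Pre_solution land → Spec_solution land (solution land)

-- ===== LEMMAS AND PROOFS =====

lemma step_eq (prev row : List Int) : solStepA prev row = solStepB prev row := by
  simp only [solStepA, solStepB, get_max]
  refine congrArg₂ _ (by omega) (congrArg₂ _ (by omega) (congrArg₂ _ (by omega) rfl))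

lemma rows_eq (rest : List (List Int)) : ∀ prev, solRowsA prev rest = solRowsB prev rest := by
  induction rest with
  | nil => intro prev; rfl
  | cons row rest ih => intro prev; simp only [solRowsA, solRowsB, step_eq, ih]

-- ===== VERDICT (by name: the statement is the Claim_ definition above) =====
theorem solution_spec : Claim_equal_solution := by
  intro land _ _
  unfold Spec_solution solution solution_alt
  cases land with
  | nil => rfl
  | cons r rest => simp only [rows_eq, get_answer]
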